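-- pv_equiv track=rewrite | github.com/Zayakind/learn_development | eight_algoritms/white_walkers.py | white_walkers
-- ===== SOURCE A (Python) =====
-- def search_digit_indexes(value: str) -> list:
--     return list(map(lambda x: x[0], filter(lambda x: x[1].isdigit(), enumerate(value))))
--
-- def search_white_walkers(substring: str) -> int:
--     count_letter = 0
--     for letter in substring:
--         if letter == '=':
--             count_letter += 1
--     return count_letter
--
-- def white_walkers(village: str) -> bool:
--     digit_indexes = search_digit_indexes(village)
--
--     if len(digit_indexes) <= 1:
--         return False
--
--     count_pairs, count_walkers = 0, 0
--     for i, j in zip(digit_indexes, digit_indexes[1:]):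
--         if int(village[i]) + int(village[j]) != 10:
--             continue
--         count_pairs += 1
--         amount_white_walkers = search_white_walkers(village[i:j + 1])
--         if amount_white_walkers == 3:
--             count_walkers += 1
--     return count_walkers == count_pairs
-- ===== SOURCE B (Python) =====
-- def white_walkers(village: str) -> bool:
--     prev = None
--     eq_run = 0
--     digits = 0
--     count_pairs = 0
--     count_walkers = 0
--     for ch in village:
--         if ch.isdigit():
--             cur = int(ch)
--             if prev is not None and prev + cur == 10:
--                 count_pairs += 1
--                 if eq_run == 3:
--                     count_walkers += 1
--             prev = cur
--             eq_run = 0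
--             digits += 1
--         elif ch == '=':
--             eq_run += 1
--     if digits < 2:
--         return False
--     return count_walkers == count_pairs
-- ===== Notes on version B (the rewrite author's own statement) =====
-- stated objective: simpler
-- what changed: A builds the list of digit indexes, zips it with its tail and re-counts the equals signs of a fresh string slice for every adjacent pair; B is a single left-to-right pass carrying the previous digit, a running equals-sign counter reset at each digit, a digit count and the pair/walker counters, so no index list and no slices are built.
import Mathlib
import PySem

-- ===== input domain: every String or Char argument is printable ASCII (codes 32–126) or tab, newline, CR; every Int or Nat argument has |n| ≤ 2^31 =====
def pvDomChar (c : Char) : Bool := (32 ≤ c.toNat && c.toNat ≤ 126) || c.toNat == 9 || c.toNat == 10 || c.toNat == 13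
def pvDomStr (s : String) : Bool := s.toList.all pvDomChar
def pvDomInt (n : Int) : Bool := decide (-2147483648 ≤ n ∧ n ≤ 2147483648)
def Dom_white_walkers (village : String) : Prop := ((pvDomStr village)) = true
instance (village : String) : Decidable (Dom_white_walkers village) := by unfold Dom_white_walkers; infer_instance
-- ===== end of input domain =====

-- B replaces A's index-list + per-pair slicing with one pass that carries the previous digit and a
-- running '=' counter (objective: simpler/faster single pass; equivalence of the RETURN value is what is proved).

-- ===== PORT A =====
-- int(<one-char string>) in total form (int(s) = PySem.Int.ofChars? on its code points);
-- the ' ' / 0 defaults are unreachable where this is used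
-- (it is only applied to in-range ASCII digit positions).
def dval (c : Char) : Int := (PySem.Int.ofChars? [c]).getD 0

-- int(village[i]) : village[i] → PySem.Str.pyGet?, then int() on the one-char string
def pyIntAt (s : String) (i : Int) : Int := dval ((PySem.Str.pyGet? s i).getD ' ')

def search_digit_indexes (value : String) : List Int :=
  ((PySem.List.enumerate value.toList).filter (fun x => PySem.Chars.isdigit x.2)).map (fun x => x.1)

def search_white_walkers (substring : String) : Int :=
  substring.toList.foldl (fun count_letter letter => if letter == '=' then count_letter + 1 else count_letter) 0

def white_walkers (village : String) : Bool :=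
  let digit_indexes := search_digit_indexes village
  if digit_indexes.length ≤ 1 then false
  else
    let r := (List.zip digit_indexes (PySem.List.slice digit_indexes (some 1) none)).foldl
      (fun (s : Int × Int) (ij : Int × Int) =>
        if pyIntAt village ij.1 + pyIntAt village ij.2 ≠ 10 then s
        else
          let count_pairs := s.1 + 1
          let amount_white_walkers := search_white_walkers (PySem.Str.slice village (some ij.1) (some (ij.2 + 1)))
          let count_walkers := if amount_white_walkers == 3 then s.2 + 1 else s.2
          (count_pairs, count_walkers))
      (0, 0)
    r.2 == r.1

-- ===== PORT B =====
def white_walkers_alt (village : String) : Bool :=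
  let st := village.toList.foldl
    (fun (st : Option Int × Int × Int × Int × Int) ch =>
      let (prev, eq_run, digits, count_pairs, count_walkers) := st
      if PySem.Chars.isdigit ch then
        let cur := dval ch
        let (count_pairs, count_walkers) :=
          match prev with
          | some q =>
            if q + cur == 10 then
              (count_pairs + 1, if eq_run == 3 then count_walkers + 1 else count_walkers)
            else (count_pairs, count_walkers)
          | none => (count_pairs, count_walkers)
        (some cur, 0, digits + 1, count_pairs, count_walkers)
      else if ch == '=' then (prev, eq_run + 1, digits, count_pairs, count_walkers)
      else (prev, eq_run, digits, count_pairs, count_walkers))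
    (none, 0, 0, 0, 0)
  if st.2.2.1 < 2 then false
  else st.2.2.2.2 == st.2.2.2.1

-- ===== PRECONDITION & SPEC =====
def Spec_white_walkers (village : String) (out : Bool) : Prop := out = white_walkers_alt village
instance (village : String) (out : Bool) : Decidable (Spec_white_walkers village out) := by unfold Spec_white_walkers; infer_instance

-- ===== CLAIM (what is proved, stated in full; the proofs are below) =====
def Claim_equal_white_walkers : Prop := ∀ (village : String), Dom_white_walkers village → Spec_white_walkers village (white_walkers village)

-- ===== LEMMAS AND PROOFS =====

-- positions of the digit characters (A's digit_indexes, as Nats)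
def dIdx : List Char → List Nat
  | [] => []
  | c :: cs => if PySem.Chars.isdigit c then 0 :: (dIdx cs).map (· + 1) else (dIdx cs).map (· + 1)

-- the digits of cs with, for each, the number of '=' since the previous digit (k = pending count)
def tokens : List Char → Nat → List (Int × Nat)
  | [], _ => []
  | c :: cs, k =>
    if PySem.Chars.isdigit c then (dval c, k) :: tokens cs 0
    else tokens cs (k + (if c == '=' then 1 else 0))

-- the data A's loop reads for an adjacent index pair (n, m)
def g3 (cs : List Char) (nm : Nat × Nat) : Int × Int × Nat :=
  (dval (cs.getD nm.1 ' '), dval (cs.getD nm.2 ' '),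
    ((cs.drop nm.1).take (nm.2 + 1 - nm.1)).count '=')

def aTrip (cs : List Char) : List (Int × Int × Nat) :=
  (List.zip (dIdx cs) (dIdx cs).tail).map (g3 cs)

def tTrip (ts : List (Int × Nat)) : List (Int × Int × Nat) :=
  (List.zip ts ts.tail).map (fun p => (p.1.1, p.2.1, p.2.2))

def pairStep (s : Int × Int) (t : Int × Int × Nat) : Int × Int :=
  if t.1 + t.2.1 ≠ 10 then s
  else (s.1 + 1, if ((t.2.2 : Int) == 3) then s.2 + 1 else s.2)

def tLoop : Option Int → Int → Int → List (Int × Nat) → Int × Int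
  | _, p, w, [] => (p, w)
  | prev, p, w, (v, e) :: ts =>
    match prev with
    | some q =>
      if q + v == 10 then tLoop (some v) (p + 1) (if ((e : Int) == 3) then w + 1 else w) ts
      else tLoop (some v) p w ts
    | none => tLoop (some v) p w ts

lemma sdi_aux (cs : List Char) : ∀ s : Int,
    ((PySem.List.enumerate cs s).filter (fun x => PySem.Chars.isdigit x.2)).map (fun x => x.1)
      = (dIdx cs).map (fun n : Nat => (n : Int) + s) := by
  induction cs with
  | nil => intro s; simp [PySem.List.enumerate_nil, dIdx]
  | cons c cs ih =>
    intro s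
    rw [PySem.List.enumerate_cons]
    by_cases h : PySem.Chars.isdigit c
    · rw [List.filter_cons_of_pos (by simpa using h)]
      simp only [List.map_cons, ih (s + 1)]
      simp only [dIdx, if_pos h, List.map_cons, List.map_map]
      refine List.cons_eq_cons.mpr ⟨by simp, ?_⟩
      apply List.map_congr_left; intro n _; simp; ring
    · rw [List.filter_cons_of_neg (by simpa using h), ih (s + 1)]
      simp only [dIdx, if_neg h, List.map_map]
      apply List.map_congr_left; intro n _; simp; ring

lemma sdi_eq (v : String) :
    search_digit_indexes v = (dIdx v.toList).map (fun n : Nat => (n : Int)) := by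
  unfold search_digit_indexes
  rw [sdi_aux v.toList 0]
  apply List.map_congr_left; intro n _; simp

lemma sww_eq (s : String) :
    search_white_walkers s = (s.toList.count '=' : Int) := by
  unfold search_white_walkers
  rw [PySem.List.foldl_beq_add_one]
  simp

lemma dIdx_mem_lt {cs : List Char} {n : Nat} (h : n ∈ dIdx cs) : n < cs.length := by
  induction cs generalizing n with
  | nil => simp [dIdx] at h
  | cons c cs ih =>
    simp only [dIdx] at h
    by_cases hd : PySem.Chars.isdigit c
    · rw [if_pos hd] at h
      rcases List.mem_cons.mp h with h | h
      · simp [h]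
      · rcases List.mem_map.mp h with ⟨m, hm, hmn⟩
        subst hmn
        simpa using Nat.succ_lt_succ (ih hm)
    · rw [if_neg hd] at h
      rcases List.mem_map.mp h with ⟨m, hm, hmn⟩
      subst hmn
      simpa using Nat.succ_lt_succ (ih hm)

lemma dIdx_mem_digit {cs : List Char} {n : Nat} (h : n ∈ dIdx cs) :
    PySem.Chars.isdigit (cs.getD n ' ') = true := by
  induction cs generalizing n with
  | nil => simp [dIdx] at h
  | cons c cs ih =>
    simp only [dIdx] at h
    by_cases hd : PySem.Chars.isdigit c
    · rw [if_pos hd] at h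
      rcases List.mem_cons.mp h with h | h
      · subst h; simpa using hd
      · rcases List.mem_map.mp h with ⟨m, hm, hmn⟩
        subst hmn
        simpa using ih hm
    · rw [if_neg hd] at h
      rcases List.mem_map.mp h with ⟨m, hm, hmn⟩
      subst hmn
      simpa using ih hm

-- a digit character is not '='
lemma digit_ne_eq {c : Char} (h : PySem.Chars.isdigit c = true) : (c == '=') = false := by
  by_contra hne
  have : c = '=' := by
    cases hc : (c == '=') with
    | false => exact absurd hc hne
    | true => exact eq_of_beq hc
  subst this
  simp [PySem.Chars.isdigit] at h

lemma count_take_succ_of_digit {cs : List Char} {p : Nat} (hlt : p < cs.length)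
    (hd : PySem.Chars.isdigit (cs.getD p ' ') = true) :
    (cs.take (p + 1)).count '=' = (cs.take p).count '=' := by
  rw [List.getD_eq_getElem cs ' ' hlt] at hd
  rw [List.take_add_one, List.getElem?_eq_getElem hlt]
  have h2 : (cs[p] == '=') = false := digit_ne_eq hd
  simp only [Option.toList_some, List.count_append, List.count_cons, List.count_nil, h2]
  simp

-- shift invariance of g3
lemma g3_shift (c : Char) (cs : List Char) (n m : Nat) :
    g3 (c :: cs) (n + 1, m + 1) = g3 cs (n, m) := by
  simp only [g3, List.getD_cons_succ, List.drop_succ_cons]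
  have h : m + 1 + 1 - (n + 1) = m + 1 - n := by omega
  rw [h]

lemma aTrip_map_shift (c : Char) (cs : List Char) (l : List Nat) :
    (List.zip (l.map (· + 1)) ((l.map (· + 1)).tail)).map (g3 (c :: cs))
      = (List.zip l l.tail).map (g3 cs) := by
  rw [← List.map_tail, List.zip_map, List.map_map]
  apply List.map_congr_left
  intro nm _
  simpa using g3_shift c cs nm.1 nm.2

-- CORE: A's per-pair data equals adjacent token pairs
lemma core (cs : List Char) : ∀ k : Nat,
    aTrip cs = tTrip (tokens cs k)
    ∧ (tokens cs k).length = (dIdx cs).length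
    ∧ ∀ p ps, dIdx cs = p :: ps →
        (tokens cs k).head? = some (dval (cs.getD p ' '), k + (cs.take p).count '=') := by
  induction cs with
  | nil => intro k; refine ⟨rfl, rfl, ?_⟩; intro p ps h; simp [dIdx] at h
  | cons c cs ih =>
    intro k
    by_cases hd : PySem.Chars.isdigit c
    · -- c is a digit
      have hdIdx : dIdx (c :: cs) = 0 :: (dIdx cs).map (· + 1) := by simp [dIdx, hd]
      have htok : tokens (c :: cs) k = (dval c, k) :: tokens cs 0 := by simp [tokens, hd]
      obtain ⟨ih1, ih2, ih3⟩ := ih 0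
      refine ⟨?_, ?_, ?_⟩
      · -- aTrip = tTrip
        cases hcs : dIdx cs with
        | nil =>
          have hnil : tokens cs 0 = [] := List.length_eq_zero_iff.mp (by rw [ih2, hcs]; rfl)
          unfold aTrip tTrip
          rw [hdIdx, htok, hcs, hnil]
          simp
        | cons p ps =>
          obtain ⟨t, ts, hts⟩ : ∃ t ts, tokens cs 0 = t :: ts := by
            rcases htl : tokens cs 0 with _ | ⟨t, ts⟩
            · exfalso; have := ih2; rw [htl, hcs] at this; simp at this
            · exact ⟨t, ts, rfl⟩
          have hplt : p < cs.length := dIdx_mem_lt (by rw [hcs]; simp)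
          have hpd : PySem.Chars.isdigit (cs.getD p ' ') = true := dIdx_mem_digit (by rw [hcs]; simp)
          have hhead : t = (dval (cs.getD p ' '), 0 + (cs.take p).count '=') := by
            have h3 := ih3 p ps hcs
            rw [hts] at h3
            simpa using h3
          have hLHS : (List.zip (dIdx (c :: cs)) (dIdx (c :: cs)).tail).map (g3 (c :: cs))
              = g3 (c :: cs) (0, p + 1)
                :: (List.zip ((dIdx cs).map (· + 1)) (((dIdx cs).map (· + 1)).tail)).map (g3 (c :: cs)) := by
            rw [hdIdx, hcs]
            simp [List.zip_cons_cons]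
          have hRHS : tTrip (tokens (c :: cs) k) = (dval c, t.1, t.2) :: tTrip (t :: ts) := by
            rw [htok, hts]
            simp [tTrip, List.zip_cons_cons]
          show aTrip (c :: cs) = tTrip (tokens (c :: cs) k)
          unfold aTrip
          rw [hLHS, aTrip_map_shift c cs (dIdx cs), hRHS]
          congr 1
          · -- heads agree
            subst hhead
            simp only [g3, List.drop_zero, List.getD_cons_zero, List.getD_cons_succ, Nat.sub_zero]
            refine Prod.ext rfl (Prod.ext rfl ?_)
            show ((c :: cs).take (p + 1 + 1)).count '=' = 0 + (cs.take p).count '='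
            rw [List.take_succ_cons, List.count_cons]
            rw [count_take_succ_of_digit hplt hpd, digit_ne_eq hd]
            simp
          · -- tails agree
            rw [← hts]
            exact ih1
      · rw [hdIdx, htok]; simpa using ih2
      · intro p ps h
        rw [hdIdx] at h
        injection h with h1 h2
        subst h1
        rw [htok]
        simp
    · -- c is not a digit
      have hdIdx : dIdx (c :: cs) = (dIdx cs).map (· + 1) := by simp [dIdx, hd]
      have htok : tokens (c :: cs) k = tokens cs (k + (if c == '=' then 1 else 0)) := by
        simp [tokens, hd]
      obtain ⟨ih1, ih2, ih3⟩ := ih (k + (if c == '=' then 1 else 0))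
      refine ⟨?_, ?_, ?_⟩
      · show aTrip (c :: cs) = tTrip (tokens (c :: cs) k)
        unfold aTrip
        rw [hdIdx, aTrip_map_shift c cs (dIdx cs), htok]
        exact ih1
      · rw [hdIdx, htok]; simpa using ih2
      · intro p ps h
        rw [hdIdx] at h
        rcases List.map_eq_cons_iff.mp h with ⟨p', ps', hcs, hp, hps⟩
        subst hp
        rw [htok]
        have h3 := ih3 p' ps' hcs
        rw [h3]
        have hfst : cs.getD p' ' ' = (c :: cs).getD (p' + 1) ' ' := by
          simp
        have hsnd : (k + (if c == '=' then 1 else 0)) + (cs.take p').count '='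
            = k + (((c :: cs).take (p' + 1)).count '=') := by
          rw [List.take_succ_cons, List.count_cons]
          cases hc : (c == '=') <;> simp [hc] <;> omega
        rw [hfst, hsnd]
  -- end core

-- tLoop with a previous digit is the pair fold over adjacent tokens
lemma tLoop_some (ts : List (Int × Nat)) : ∀ (v : Int) (e : Nat) (p w : Int),
    tLoop (some v) p w ts = List.foldl pairStep (p, w) (tTrip ((v, e) :: ts)) := by
  induction ts with
  | nil => intro v e p w; simp [tLoop, tTrip]
  | cons t ts ih =>
    intro v e p w
    obtain ⟨u, f⟩ := t
    simp only [tTrip, List.tail_cons, List.zip_cons_cons, List.map_cons, List.foldl_cons]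
    show tLoop (some v) p w ((u, f) :: ts) = _
    simp only [tLoop]
    by_cases h : v + u = 10
    · rw [if_pos (by simpa using h)]
      rw [ih u f]
      congr 1
      simp [pairStep, h]
    · rw [if_neg (by simpa using h)]
      rw [ih u f]
      congr 1
      simp [pairStep, h]

lemma tLoop_none (ts : List (Int × Nat)) (p w : Int) :
    List.foldl pairStep (p, w) (tTrip ts) = tLoop none p w ts := by
  cases ts with
  | nil => simp [tLoop, tTrip]
  | cons t ts =>
    obtain ⟨v, e⟩ := t
    rw [show tLoop none p w ((v, e) :: ts) = tLoop (some v) p w ts from rfl]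
    rw [tLoop_some ts v e p w]

-- B's loop invariant: digit count and the (pairs, walkers) accumulator
lemma B_fold (cs : List Char) : ∀ (prev : Option Int) (k : Nat) (dg p w : Int),
    (cs.foldl
      (fun (st : Option Int × Int × Int × Int × Int) ch =>
        let (prev, eq_run, digits, count_pairs, count_walkers) := st
        if PySem.Chars.isdigit ch then
          let cur := dval ch
          let (count_pairs, count_walkers) :=
            match prev with
            | some q =>
              if q + cur == 10 then
                (count_pairs + 1, if eq_run == 3 then count_walkers + 1 else count_walkers)
              else (count_pairs, count_walkers)
            | none => (count_pairs, count_walkers)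
          (some cur, 0, digits + 1, count_pairs, count_walkers)
        else if ch == '=' then (prev, eq_run + 1, digits, count_pairs, count_walkers)
        else (prev, eq_run, digits, count_pairs, count_walkers))
      (prev, (k : Int), dg, p, w)).2.2
      = (dg + ((dIdx cs).length : Int), tLoop prev p w (tokens cs k)) := by
  induction cs with
  | nil => intro prev k dg p w; simp [tokens, tLoop, dIdx]
  | cons c cs ih =>
    intro prev k dg p w
    rw [List.foldl_cons]
    by_cases hd : PySem.Chars.isdigit c
    · have htok : tokens (c :: cs) k = (dval c, k) :: tokens cs 0 := by simp [tokens, hd]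
      have hlen : (dIdx (c :: cs)).length = (dIdx cs).length + 1 := by simp [dIdx, hd]
      rw [htok, hlen]
      cases prev with
      | none =>
        simp only [hd, if_true]
        have h := ih (some (dval c)) 0 (dg + 1) p w
        simp only [Nat.cast_zero] at h
        rw [h]
        simp only [Prod.mk.injEq]
        refine ⟨by push_cast; ring, rfl⟩
      | some q =>
        simp only [hd, if_true]
        by_cases hq : (q + dval c == 10) = true
        · simp only [hq, if_true]
          have h := ih (some (dval c)) 0 (dg + 1) (p + 1)
            (if (k : Int) == 3 then w + 1 else w)
          simp only [Nat.cast_zero] at h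
          rw [h]
          simp only [Prod.mk.injEq]
          refine ⟨by push_cast; ring, ?_⟩
          show _ = tLoop (some q) p w ((dval c, k) :: tokens cs 0)
          simp [tLoop, hq]
        · simp only [hq, if_false, Bool.false_eq_true]
          have h := ih (some (dval c)) 0 (dg + 1) p w
          simp only [Nat.cast_zero] at h
          rw [h]
          simp only [Prod.mk.injEq]
          refine ⟨by push_cast; ring, ?_⟩
          show _ = tLoop (some q) p w ((dval c, k) :: tokens cs 0)
          simp [tLoop, hq]
    · have htok : tokens (c :: cs) k = tokens cs (k + (if c == '=' then 1 else 0)) := by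
        simp [tokens, hd]
      have hlen : (dIdx (c :: cs)).length = (dIdx cs).length := by simp [dIdx, hd]
      rw [htok, hlen]
      by_cases hc : (c == '=') = true
      · simp only [hd, if_false, hc, if_true, Bool.false_eq_true]
        have h := ih prev (k + 1) dg p w
        have hcast : ((k : Int) + 1) = ((k + 1 : Nat) : Int) := by push_cast; ring
        rw [hcast, h]
      · simp only [hd, if_false, hc, Bool.false_eq_true]
        have h := ih prev k dg p w
        rw [h]
        simp

-- ===== VERDICT (by name: the statement is the Claim_ definition above) =====
set_option maxHeartbeats 1000000 in
theorem white_walkers_spec : Claim_equal_white_walkers := by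
  intro village _
  unfold Spec_white_walkers
  have hB := B_fold village.toList none 0 0 0 0
  simp only [Nat.cast_zero] at hB
  have hstep : ∀ (s : Int × Int) (nm : Nat × Nat),
      (fun (s : Int × Int) (ij : Int × Int) =>
        if pyIntAt village ij.1 + pyIntAt village ij.2 ≠ 10 then s
        else
          let count_pairs := s.1 + 1
          let amount_white_walkers := search_white_walkers (PySem.Str.slice village (some ij.1) (some (ij.2 + 1)))
          let count_walkers := if amount_white_walkers == 3 then s.2 + 1 else s.2
          (count_pairs, count_walkers)) s (((nm.1 : Int)), ((nm.2 : Int)))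
      = pairStep s (g3 village.toList nm) := by
    intro s nm
    have hget : ∀ n : Nat, pyIntAt village (n : Int) = dval (village.toList.getD n ' ') := by
      intro n
      unfold pyIntAt
      rw [PySem.Str.pyGet?_natCast]
      rfl
    have hsl : search_white_walkers (PySem.Str.slice village (some (nm.1 : Int)) (some ((nm.2 : Int) + 1)))
        = (((village.toList.drop nm.1).take (nm.2 + 1 - nm.1)).count '=' : Int) := by
      rw [sww_eq, PySem.Str.toList_slice, PySem.Chars.slice_eq_listSlice]
      have : ((nm.2 : Int) + 1) = ((nm.2 + 1 : Nat) : Int) := by push_cast; ring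
      rw [this, PySem.List.slice_natCast]
    show (if pyIntAt village (nm.1 : Int) + pyIntAt village (nm.2 : Int) ≠ 10 then s
        else (s.1 + 1,
          if search_white_walkers (PySem.Str.slice village (some (nm.1 : Int)) (some ((nm.2 : Int) + 1))) == 3
          then s.2 + 1 else s.2))
      = pairStep s (g3 village.toList nm)
    rw [hget nm.1, hget nm.2, hsl]
    simp only [pairStep, g3]
    rfl
  have hA : ∀ (d : List Nat),
      (List.zip (d.map (fun n : Nat => (n : Int))) (PySem.List.slice (d.map (fun n : Nat => (n : Int))) (some 1) none)).foldl
        (fun (s : Int × Int) (ij : Int × Int) =>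
          if pyIntAt village ij.1 + pyIntAt village ij.2 ≠ 10 then s
          else
            let count_pairs := s.1 + 1
            let amount_white_walkers := search_white_walkers (PySem.Str.slice village (some ij.1) (some (ij.2 + 1)))
            let count_walkers := if amount_white_walkers == 3 then s.2 + 1 else s.2
            (count_pairs, count_walkers)) (0, 0)
      = List.foldl pairStep (0, 0) ((List.zip d d.tail).map (g3 village.toList)) := by
    intro d
    rw [PySem.List.slice_from_one, ← List.map_tail, List.zip_map, List.foldl_map, List.foldl_map]
    congr 1
    funext s nm
    exact hstep s nm
  unfold white_walkers white_walkers_alt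
  rw [sdi_eq]
  simp only [List.length_map]
  have h1 := congrArg Prod.fst hB
  have h2 := congrArg Prod.snd hB
  simp only at h1 h2
  by_cases hlen : (dIdx village.toList).length ≤ 1
  · rw [if_pos hlen, if_pos (by rw [h1]; omega)]
  · rw [if_neg hlen, if_neg (by rw [h1]; omega)]
    rw [hA (dIdx village.toList)]
    have hcore := (core village.toList 0).1
    unfold aTrip at hcore
    rw [hcore, tLoop_none]
    rw [h2]
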